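-- pv_equiv track=rewrite | github.com/akhil-m/bc-data-warehouse | src/statscan/ingest.py | find_csv_in_zip
-- ===== SOURCE A (Python) =====
-- def find_csv_in_zip(namelist):
--     """Find data CSV file in ZIP archive, skipping metadata files.
--
--     Args:
--         namelist: List of filenames from ZipFile.namelist()
--
--     Returns:
--         CSV filename to process (data file, not metadata)
--
--     Raises:
--         ValueError: If no CSV file found or namelist is empty
--     """
--     if not namelist:
--         raise ValueError("ZIP archive is empty")
--
--     csv_files = [name for name in namelist if name.lower().endswith('.csv')]
--
--     if not csv_files:
--         raise ValueError(f"No CSV file found in ZIP. Files: {namelist}")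
--
--     # Skip MetaData CSV files (e.g., '98100137_MetaData.csv')
--     data_csvs = [f for f in csv_files if 'MetaData' not in f]
--
--     # Prefer data CSV, fallback to first CSV if all are metadata
--     return data_csvs[0] if data_csvs else csv_files[0]
-- ===== SOURCE B (Python) =====
-- def find_csv_in_zip(namelist):
--     """Find data CSV file in ZIP archive, skipping metadata files.
--
--     Single pass: return the first non-MetaData CSV immediately; remember the
--     first MetaData CSV as a fallback."""
--     if not namelist:
--         raise ValueError("ZIP archive is empty")
--     first_meta = None
--     for name in namelist:
--         if name.lower().endswith('.csv'):
--             if 'MetaData' not in name: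
--                 return name
--             if first_meta is None:
--                 first_meta = name
--     if first_meta is None:
--         raise ValueError(f"No CSV file found in ZIP. Files: {namelist}")
--     return first_meta
-- ===== Notes on version B (the rewrite author's own statement) =====
-- stated objective: simpler
-- what changed: Replaces the two list-comprehension filtering passes with one short-circuit loop that returns the first non-MetaData CSV immediately and remembers the first MetaData CSV as a fallback.
import Mathlib
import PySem

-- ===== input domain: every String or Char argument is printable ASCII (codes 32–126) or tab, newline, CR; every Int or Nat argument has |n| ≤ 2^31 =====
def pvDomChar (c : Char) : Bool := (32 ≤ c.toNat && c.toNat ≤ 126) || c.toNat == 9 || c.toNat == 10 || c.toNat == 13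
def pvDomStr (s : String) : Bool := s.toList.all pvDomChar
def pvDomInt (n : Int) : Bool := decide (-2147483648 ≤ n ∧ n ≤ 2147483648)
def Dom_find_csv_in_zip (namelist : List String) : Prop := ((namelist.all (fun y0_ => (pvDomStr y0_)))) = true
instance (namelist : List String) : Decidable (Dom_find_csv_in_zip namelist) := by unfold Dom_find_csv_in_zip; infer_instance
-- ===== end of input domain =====

-- B: one short-circuit loop (first data CSV returned immediately, first MetaData CSV kept as fallback) instead of A's two list-comprehension passes; simpler.
-- Both Pythons raise ValueError where Pre_ fails; the equivalence is about return values on Pre_.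
-- ===== PORT A =====
def find_csv_in_zip (namelist : List String) : String :=
  if namelist = [] then ""  -- raise ValueError("ZIP archive is empty"): outside Pre_
  else
    let csv_files := namelist.filter (fun name => PySem.Str.endswith (PySem.Str.lower name) ".csv")
    if csv_files = [] then ""  -- raise ValueError("No CSV file found in ZIP. ..."): outside Pre_
    else
      let data_csvs := csv_files.filter (fun f => !(PySem.Str.isIn "MetaData" f))
      if data_csvs ≠ [] then data_csvs.headD "" else csv_files.headD ""

-- ===== PORT B =====
-- the for-loop of Source B: `firstMeta` is `first_meta`; returning `name` is the early return
def findLoopB : List String → Option String → String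
  | [], firstMeta => firstMeta.getD ""  -- first_meta is None: raise, outside Pre_
  | name :: rest, firstMeta =>
    if PySem.Str.endswith (PySem.Str.lower name) ".csv" then
      if !(PySem.Str.isIn "MetaData" name) then name
      else findLoopB rest (if firstMeta.isNone then some name else firstMeta)
    else findLoopB rest firstMeta

def find_csv_in_zip_alt (namelist : List String) : String :=
  if namelist = [] then ""  -- raise: outside Pre_
  else findLoopB namelist none

-- ===== PRECONDITION & SPEC =====
-- Pre_: some name in namelist is a CSV (A raises ValueError otherwise; B raises there too)
def Pre_find_csv_in_zip (namelist : List String) : Prop :=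
  ∃ name ∈ namelist, PySem.Str.endswith (PySem.Str.lower name) ".csv" = true
instance (namelist : List String) : Decidable (Pre_find_csv_in_zip namelist) := by
  unfold Pre_find_csv_in_zip; infer_instance
def pvWitness_find_csv_in_zip : List String := (["data.csv", "98100137_MetaData.csv"])
def Spec_find_csv_in_zip (namelist : List String) (out : String) : Prop := out = find_csv_in_zip_alt namelist
instance (namelist : List String) (out : String) : Decidable (Spec_find_csv_in_zip namelist out) := by unfold Spec_find_csv_in_zip; infer_instance

-- ===== CLAIM (what is proved, stated in full; the proofs are below) =====
def Claim_equal_find_csv_in_zip : Prop := ∀ (namelist : List String), Dom_find_csv_in_zip namelist → Pre_find_csv_in_zip namelist → Spec_find_csv_in_zip namelist (find_csv_in_zip namelist)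

-- ===== LEMMAS AND PROOFS =====

-- B's loop computes: the head of the combined filter, else the fallback (acc if set, else the first CSV)
lemma findLoopB_eq (l : List String) (acc : Option String) :
    findLoopB l acc =
      match l.filter (fun n => PySem.Str.endswith (PySem.Str.lower n) ".csv" && !(PySem.Str.isIn "MetaData" n)) with
      | d :: _ => d
      | [] => acc.getD ((l.filter (fun n => PySem.Str.endswith (PySem.Str.lower n) ".csv")).headD "") := by
  induction l generalizing acc with
  | nil => simp [findLoopB]
  | cons name rest ih =>
    simp only [findLoopB, List.filter_cons]
    by_cases hc : PySem.Str.endswith (PySem.Str.lower name) ".csv" = true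
    · by_cases hd : PySem.Str.isIn "MetaData" name = true
      · -- a MetaData CSV: loop records it (if first) and continues
        rw [hc, hd, ih]
        cases hacc : acc <;>
          cases hF : rest.filter (fun n => PySem.Str.endswith (PySem.Str.lower n) ".csv" && !(PySem.Str.isIn "MetaData" n)) <;>
          simp_all
      · -- a data CSV: loop returns it, and it heads the combined filter
        rw [Bool.not_eq_true] at hd
        rw [hc, hd]
        simp
    · -- not a CSV: both sides pass through unchanged
      rw [Bool.not_eq_true] at hc
      rw [hc]
      simp only [Bool.false_eq_true, if_false, Bool.false_and]
      rw [ih]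

-- ===== VERDICT (by name: the statement is the Claim_ definition above) =====
theorem find_csv_in_zip_spec : Claim_equal_find_csv_in_zip := by
  intro namelist _ hpre
  obtain ⟨w, hw, hcsv⟩ := hpre
  have hne : namelist ≠ [] := by rintro rfl; exact absurd hw List.not_mem_nil
  have hfne : namelist.filter (fun name => PySem.Str.endswith (PySem.Str.lower name) ".csv") ≠ [] := by
    intro h
    have hm : w ∈ namelist.filter (fun name => PySem.Str.endswith (PySem.Str.lower name) ".csv") :=
      List.mem_filter.mpr ⟨hw, hcsv⟩
    rw [h] at hm
    exact absurd hm List.not_mem_nil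
  simp only [Spec_find_csv_in_zip, find_csv_in_zip, find_csv_in_zip_alt]
  rw [if_neg hne, if_neg hne, if_neg hfne, findLoopB_eq]
  have hff : (namelist.filter (fun name => PySem.Str.endswith (PySem.Str.lower name) ".csv")).filter
        (fun f => !(PySem.Str.isIn "MetaData" f)) =
      namelist.filter (fun n => PySem.Str.endswith (PySem.Str.lower n) ".csv" && !(PySem.Str.isIn "MetaData" n)) := by
    rw [List.filter_filter]
    exact List.filter_congr (fun a _ => Bool.and_comm _ _)
  rw [hff]
  cases hF : namelist.filter (fun n => PySem.Str.endswith (PySem.Str.lower n) ".csv" && !(PySem.Str.isIn "MetaData" n)) <;>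
    simp_all
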